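-- pv_equiv track=rewrite | github.com/HouJian2020/alphagen | utils/tools.py | split_string_with_ignore_parentheses
-- ===== SOURCE A (Python) =====
-- def split_string_with_ignore_parentheses(formula_str):
--     result = []
--     current = ""
--     parentheses_count = 0
--
--     for char in formula_str:
--         if char == "(":
--             parentheses_count += 1
--         elif char == ")":
--             parentheses_count = max(0, parentheses_count - 1)
--         elif char == "," and parentheses_count == 0:
--             result.append(current)
--             current = ""
--             continue
--         current += char
--
--     if current:
--         result.append(current)
--
--     return result
-- ===== SOURCE B (Python) =====
-- def _find_cut(s):
--     # index of the first comma at parenthesis depth 0 in s, or None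
--     depth = 0
--     for i, ch in enumerate(s):
--         if ch == "(":
--             depth += 1
--         elif ch == ")":
--             depth = max(0, depth - 1)
--         elif ch == "," and depth == 0:
--             return i
--     return None
--
--
-- def split_string_with_ignore_parentheses(formula_str):
--     parts = []
--     rest = formula_str
--     while True:
--         i = _find_cut(rest)
--         if i is None:
--             break
--         parts.append(rest[:i])
--         rest = rest[i + 1:]
--     if rest:
--         parts.append(rest)
--     return parts
-- ===== Notes on version B (the rewrite author's own statement) =====
-- stated objective: alternative
-- what changed: B replaces A's single accumulator loop that grows each segment character by character with a repeated find-first-top-level-comma search plus slicing (like str.split implementations), with the tail appended only if nonempty.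
import Mathlib
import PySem

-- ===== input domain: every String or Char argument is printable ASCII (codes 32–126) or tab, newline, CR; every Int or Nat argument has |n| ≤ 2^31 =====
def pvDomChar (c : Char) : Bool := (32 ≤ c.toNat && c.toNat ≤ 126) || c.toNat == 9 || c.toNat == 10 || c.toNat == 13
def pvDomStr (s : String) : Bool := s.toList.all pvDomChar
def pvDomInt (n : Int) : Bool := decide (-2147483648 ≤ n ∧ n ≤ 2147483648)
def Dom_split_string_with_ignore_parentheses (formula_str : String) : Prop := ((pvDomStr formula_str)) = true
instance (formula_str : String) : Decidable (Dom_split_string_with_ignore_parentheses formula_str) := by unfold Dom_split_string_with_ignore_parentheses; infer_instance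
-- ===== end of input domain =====

-- B replaces A's accumulator loop (growing each segment char by char) with repeated
-- find-first-top-level-comma + slicing; same behaviour, alternative decomposition.


-- ===== PORT A =====
-- state: (result, current, parentheses_count); strings handled as List Char, String.mk at the end
def pvAStep (st : List (List Char) × List Char × Int) (c : Char) :
    List (List Char) × List Char × Int :=
  if c = '(' then (st.1, st.2.1 ++ [c], st.2.2 + 1)
  else if c = ')' then (st.1, st.2.1 ++ [c], max 0 (st.2.2 - 1))
  else if c = ',' ∧ st.2.2 = 0 then (st.1 ++ [st.2.1], [], st.2.2)
  else (st.1, st.2.1 ++ [c], st.2.2)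

def split_string_with_ignore_parentheses (formula_str : String) : List String :=
  let st := formula_str.toList.foldl pvAStep ([], [], 0)
  (if st.2.1 ≠ [] then st.1 ++ [st.2.1] else st.1).map String.mk

-- ===== PORT B =====
-- _find_cut: index of the first comma at depth 0, or None (enumerate ported as .map (+1))
def pvFindCut : List Char → Int → Option Nat
  | [], _ => none
  | c :: cs, depth =>
    if c = '(' then (pvFindCut cs (depth + 1)).map (· + 1)
    else if c = ')' then (pvFindCut cs (max 0 (depth - 1))).map (· + 1)
    else if c = ',' ∧ depth = 0 then some 0
    else (pvFindCut cs depth).map (· + 1)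

-- termination fact for the while loop's port (cited by pvLoopB's decreasing_by)
theorem pvFindCut_lt_length : ∀ (s : List Char) (d : Int) (i : Nat),
    pvFindCut s d = some i → i < s.length := by
  intro s
  induction s with
  | nil => intro d i h; simp [pvFindCut] at h
  | cons c cs ih =>
    intro d i h
    simp only [pvFindCut] at h
    split_ifs at h <;>
      first
        | (simp only [Option.map_eq_some_iff] at h
           obtain ⟨j, hj, rfl⟩ := h
           have := ih _ _ hj
           simpa using Nat.succ_lt_succ this)
        | (simp_all [List.length_cons]; omega)

-- the while loop: parts accumulator, rest = remaining string (slices rest[:i], rest[i+1:])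
def pvLoopB (parts : List (List Char)) (rest : List Char) : List (List Char) :=
  match h : pvFindCut rest 0 with
  | none => if rest ≠ [] then parts ++ [rest] else parts
  | some i => pvLoopB (parts ++ [rest.take i]) (rest.drop (i + 1))
termination_by rest.length
decreasing_by
  have := pvFindCut_lt_length rest 0 i h
  simp only [List.length_drop]
  omega

def split_string_with_ignore_parentheses_alt (formula_str : String) : List String :=
  (pvLoopB [] formula_str.toList).map String.mk

-- ===== PRECONDITION & SPEC =====
def Spec_split_string_with_ignore_parentheses (formula_str : String) (out : List String) : Prop := out = split_string_with_ignore_parentheses_alt formula_str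
instance (formula_str : String) (out : List String) : Decidable (Spec_split_string_with_ignore_parentheses formula_str out) := by unfold Spec_split_string_with_ignore_parentheses; infer_instance

-- ===== CLAIM (what is proved, stated in full; the proofs are below) =====
def Claim_equal_split_string_with_ignore_parentheses : Prop := ∀ (formula_str : String), Dom_split_string_with_ignore_parentheses formula_str → Spec_split_string_with_ignore_parentheses formula_str (split_string_with_ignore_parentheses formula_str)

-- ===== LEMMAS AND PROOFS =====

-- common characterisation: segments of s starting with partial segment cur at depth d
def pvSplitFrom (cur : List Char) (d : Int) : List Char → List (List Char)
  | [] => if cur ≠ [] then [cur] else []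
  | c :: cs =>
    if c = '(' then pvSplitFrom (cur ++ [c]) (d + 1) cs
    else if c = ')' then pvSplitFrom (cur ++ [c]) (max 0 (d - 1)) cs
    else if c = ',' ∧ d = 0 then cur :: pvSplitFrom [] d cs
    else pvSplitFrom (cur ++ [c]) d cs

theorem pvA_fold_eq : ∀ (s : List Char) (res : List (List Char)) (cur : List Char) (d : Int),
    (if (List.foldl pvAStep (res, cur, d) s).2.1 ≠ []
      then (List.foldl pvAStep (res, cur, d) s).1 ++ [(List.foldl pvAStep (res, cur, d) s).2.1]
      else (List.foldl pvAStep (res, cur, d) s).1) = res ++ pvSplitFrom cur d s := by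
  intro s
  induction s with
  | nil =>
    intro res cur d
    simp only [List.foldl_nil, pvSplitFrom]
    split_ifs <;> simp
  | cons c cs ih =>
    intro res cur d
    by_cases h1 : c = '('
    · have e : pvAStep (res, cur, d) c = (res, cur ++ [c], d + 1) := by simp [pvAStep, h1]
      rw [List.foldl_cons, e]
      simp only [pvSplitFrom, if_pos h1]
      exact ih res (cur ++ [c]) (d + 1)
    · by_cases h2 : c = ')'
      · have e : pvAStep (res, cur, d) c = (res, cur ++ [c], max 0 (d - 1)) := by
          simp [pvAStep, h2]
        rw [List.foldl_cons, e]
        simp only [pvSplitFrom, if_neg h1, if_pos h2]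
        exact ih res (cur ++ [c]) (max 0 (d - 1))
      · by_cases h3 : c = ',' ∧ d = 0
        · have e : pvAStep (res, cur, d) c = (res ++ [cur], [], d) := by
            simp [pvAStep, h3]
          rw [List.foldl_cons, e]
          simp only [pvSplitFrom, if_neg h1, if_neg h2, if_pos h3]
          rw [ih (res ++ [cur]) [] d]
          simp
        · have e : pvAStep (res, cur, d) c = (res, cur ++ [c], d) := by
            simp only [pvAStep, if_neg h1, if_neg h2, if_neg h3]
          rw [List.foldl_cons, e]
          simp only [pvSplitFrom, if_neg h1, if_neg h2, if_neg h3]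
          exact ih res (cur ++ [c]) d

theorem pvFindCut_none : ∀ (s : List Char) (cur : List Char) (d : Int),
    pvFindCut s d = none →
    pvSplitFrom cur d s = if cur ++ s ≠ [] then [cur ++ s] else [] := by
  intro s
  induction s with
  | nil => intro cur d _; simp [pvSplitFrom]
  | cons c cs ih =>
    intro cur d h
    simp only [pvFindCut] at h
    simp only [pvSplitFrom]
    split_ifs at h ⊢ <;> simp_all

theorem pvFindCut_some : ∀ (s : List Char) (cur : List Char) (d : Int) (i : Nat),
    pvFindCut s d = some i →
    pvSplitFrom cur d s = (cur ++ s.take i) :: pvSplitFrom [] 0 (s.drop (i + 1)) := by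
  intro s
  induction s with
  | nil => intro cur d i h; simp [pvFindCut] at h
  | cons c cs ih =>
    intro cur d i h
    simp only [pvFindCut] at h
    simp only [pvSplitFrom]
    split_ifs at h ⊢ with h1 h2 h3
    · obtain ⟨j, hj, rfl⟩ := Option.map_eq_some_iff.mp h
      rw [ih _ _ _ hj]; simp
    · obtain ⟨j, hj, rfl⟩ := Option.map_eq_some_iff.mp h
      rw [ih _ _ _ hj]; simp
    · obtain rfl : i = 0 := by simpa using h.symm
      simp [h3.2]
    · obtain ⟨j, hj, rfl⟩ := Option.map_eq_some_iff.mp h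
      rw [ih _ _ _ hj]; simp

theorem pvLoopB_eq : ∀ (rest : List Char) (parts : List (List Char)),
    pvLoopB parts rest = parts ++ pvSplitFrom [] 0 rest := by
  intro rest
  induction hn : rest.length using Nat.strong_induction_on generalizing rest with
  | _ n ih =>
    intro parts
    rw [pvLoopB]
    split
    · next h =>
      rw [pvFindCut_none rest [] 0 h]
      split_ifs <;> simp_all
    · next i h =>
      have hlt := pvFindCut_lt_length rest 0 i h
      rw [ih ((rest.drop (i + 1)).length) (by simp; omega) _ rfl]
      rw [pvFindCut_some rest [] 0 i h]
      simp

-- ===== VERDICT (by name: the statement is the Claim_ definition above) =====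
theorem split_string_with_ignore_parentheses_spec : Claim_equal_split_string_with_ignore_parentheses := by
  intro s _
  show _ = _
  simp only [split_string_with_ignore_parentheses, split_string_with_ignore_parentheses_alt,
    pvLoopB_eq, pvA_fold_eq, List.nil_append]
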